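-- pv_equiv track=rewrite | github.com/su-ram/Problem-Solving | 프로그래머스/네이버웹툰_Q1.py | solution
-- ===== SOURCE A (Python) =====
-- def solution(lottery):
--     record = {}
--     for user in lottery:
--         if record.get(user[0]) is None:
--             record[user[0]] = [1, user[1]]
--             continue
--         value = record.get(user[0])
--         if value[1] == 0 :
--             value[0] += 1
--             value[1] = user[1]
--             record[user[0]] = value
--     answer = [0,0]
--
--     for user, result in record.items():
--         if result[1] :
--             answer[0] += result[0]
--             answer[1] += 1
--     return answer[0]//answer[1] if answer[1] > 0 else 0
-- ===== SOURCE B (Python) =====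
-- def solution(lottery):
--     groups = {}
--     for user in lottery:
--         groups.setdefault(user[0], []).append(user[1])
--     num = den = 0
--     for vals in groups.values():
--         idx = next((i for i, v in enumerate(vals) if v != 0), None)
--         if idx is not None:
--             num += idx + 1
--             den += 1
--     return num // den if den > 0 else 0
-- ===== Notes on version B (the rewrite author's own statement) =====
-- stated objective: simpler
-- what changed: Instead of A's incremental per-id state machine (count plus last stored value, updated only while the last value is zero), B groups each id's values into a dict of lists in one pass and then, per group, directly computes the 1-indexed position of the first nonzero value, averaging those positions with floor division.
import Mathlib
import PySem

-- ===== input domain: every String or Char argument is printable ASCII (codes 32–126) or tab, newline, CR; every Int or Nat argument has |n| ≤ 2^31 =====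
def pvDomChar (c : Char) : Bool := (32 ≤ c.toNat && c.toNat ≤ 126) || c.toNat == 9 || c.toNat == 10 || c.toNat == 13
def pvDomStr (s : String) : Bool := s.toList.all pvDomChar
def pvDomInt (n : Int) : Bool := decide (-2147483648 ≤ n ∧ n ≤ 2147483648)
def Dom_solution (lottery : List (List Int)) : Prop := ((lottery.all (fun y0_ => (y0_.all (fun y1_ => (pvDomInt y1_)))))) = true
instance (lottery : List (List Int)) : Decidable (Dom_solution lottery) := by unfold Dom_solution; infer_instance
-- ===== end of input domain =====

-- B replaces A's incremental count/last-value state machine by grouping each id's values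
-- and computing the 1-indexed position of the first nonzero value (objective: simpler).

-- ===== PORT A =====
-- the body of A's first loop (one Python iteration)
def recordStep (record : PySem.Dict Int (Int × Int)) (user : List Int) :
    PySem.Dict Int (Int × Int) :=
  let u0 := (PySem.List.pyGet? user 0).getD 0
  let u1 := (PySem.List.pyGet? user 1).getD 0
  match record.get? u0 with
  | none => record.insert u0 (1, u1)
  | some value =>
      if value.2 = 0 then record.insert u0 (value.1 + 1, u1)
      else record

-- the body of A's second loop
def sumStepA (answer : Int × Int) (kr : Int × (Int × Int)) : Int × Int :=
  if kr.2.2 ≠ 0 then (answer.1 + kr.2.1, answer.2 + 1) else answer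

def solution (lottery : List (List Int)) : Int :=
  let record := lottery.foldl recordStep PySem.Dict.empty
  let answer := record.items.foldl sumStepA (0, 0)
  if answer.2 > 0 then PySem.Int.floordiv answer.1 answer.2 else 0

-- ===== PORT B =====
-- the body of B's grouping loop (groups.setdefault(user[0], []).append(user[1]))
def groupStep (groups : PySem.Dict Int (List Int)) (user : List Int) :
    PySem.Dict Int (List Int) :=
  let u0 := (PySem.List.pyGet? user 0).getD 0
  let u1 := (PySem.List.pyGet? user 1).getD 0
  groups.insert u0 (groups.getD u0 [] ++ [u1])

-- the body of B's averaging loop: first-nonzero position, if any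
def sumStepB (nd : Int × Int) (vals : List Int) : Int × Int :=
  match vals.findIdx? (· != 0) with
  | some i => (nd.1 + ((i : Int) + 1), nd.2 + 1)
  | none => nd

def solution_alt (lottery : List (List Int)) : Int :=
  let groups := lottery.foldl groupStep PySem.Dict.empty
  let nd := groups.values.foldl sumStepB (0, 0)
  if nd.2 > 0 then PySem.Int.floordiv nd.1 nd.2 else 0

-- ===== PRECONDITION & SPEC =====
-- Pre_ excludes inner lists of length < 2, on which Python A raises IndexError (user[0]/user[1]).
def Pre_solution (lottery : List (List Int)) : Prop := ∀ u ∈ lottery, 2 ≤ u.length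
instance (lottery : List (List Int)) : Decidable (Pre_solution lottery) := by unfold Pre_solution; infer_instance
def pvWitness_solution : List (List Int) := [[1, 0], [2, 5], [1, 3], [1, 7], [3, 0]]
def Spec_solution (lottery : List (List Int)) (out : Int) : Prop := out = solution_alt lottery
instance (lottery : List (List Int)) (out : Int) : Decidable (Spec_solution lottery out) := by unfold Spec_solution; infer_instance

-- ===== CLAIM (what is proved, stated in full; the proofs are below) =====
def Claim_equal_solution : Prop := ∀ (lottery : List (List Int)), Dom_solution lottery → Pre_solution lottery → Spec_solution lottery (solution lottery)

-- ===== LEMMAS AND PROOFS =====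

-- the A-side summary of a value list: (count, last stored value)
def fAB (l : List Int) : Int × Int :=
  match l.findIdx? (· != 0) with
  | some i => ((i : Int) + 1, l.getD i 0)
  | none => ((l.length : Int), 0)

theorem fAB_singleton (x : Int) : fAB [x] = (1, x) := by
  by_cases h : x = 0 <;>
    simp [fAB, List.findIdx?_cons, List.findIdx?_nil, h]

theorem fAB_append_zero (l : List Int) (x : Int)
    (h : l.findIdx? (· != 0) = none) : fAB (l ++ [x]) = ((l.length : Int) + 1, x) := by
  by_cases hx : x = 0 <;>
    simp [fAB, List.findIdx?_append, h, List.findIdx?_cons, List.findIdx?_nil, hx]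

theorem fAB_append_nonzero (l : List Int) (x : Int) (i : ℕ)
    (h : l.findIdx? (· != 0) = some i) : fAB (l ++ [x]) = fAB l := by
  have hi : i < l.length := (List.findIdx?_eq_some_iff_findIdx_eq.mp h).1
  simp [fAB, List.findIdx?_append, h, List.getD_eq_getElem?_getD,
    List.getElem?_append_left hi]

theorem snd_fAB_eq_zero (l : List Int) (h : l.findIdx? (· != 0) = none) :
    (fAB l).2 = 0 := by simp [fAB, h]

theorem fst_fAB_of_none (l : List Int) (h : l.findIdx? (· != 0) = none) :
    fAB l = ((l.length : Int), 0) := by simp [fAB, h]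

theorem snd_fAB_ne_zero (l : List Int) (i : ℕ) (h : l.findIdx? (· != 0) = some i) :
    (fAB l).2 ≠ 0 := by
  obtain ⟨hi, hfi⟩ := List.findIdx?_eq_some_iff_findIdx_eq.mp h
  have hw : List.findIdx (· != 0) l < l.length := by rw [hfi]; exact hi
  have hp := List.findIdx_getElem (xs := l) (p := (· != 0)) (w := hw)
  simp only [hfi] at hp
  have hne : l[i] ≠ 0 := by simpa using hp
  simp [fAB, h, List.getD_eq_getElem?_getD, List.getElem?_eq_getElem hi, hne]

theorem get?_rel {ν μ : Type} (f : ν → μ) (a : PySem.Dict Int μ) (g : PySem.Dict Int ν)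
    (hrel : a.items = g.items.map (fun p => (p.1, f p.2))) (k : Int) :
    a.get? k = (g.get? k).map f := by
  rcases a with ⟨itemsa⟩
  rcases g with ⟨itemsg⟩
  simp only [] at hrel
  subst hrel
  induction itemsg with
  | nil => rfl
  | cons p t ih =>
      rcases p with ⟨pk, pv⟩
      by_cases h : pk = k <;>
        simp [PySem.Dict.get?_mk_cons, h, ih]

-- the step invariant: A's dict is the image of B's dict under fAB
theorem dict_invariant (lottery : List (List Int))
    (a : PySem.Dict Int (Int × Int)) (g : PySem.Dict Int (List Int))
    (hnd : g.keys.Nodup)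
    (hrel : a.items = g.items.map (fun p => (p.1, fAB p.2))) :
    (lottery.foldl recordStep a).items
    = (lottery.foldl groupStep g).items.map (fun p => (p.1, fAB p.2)) := by
  induction lottery generalizing a g with
  | nil => simpa using hrel
  | cons u t ih =>
      simp only [List.foldl_cons, recordStep, groupStep]
      have hget : a.get? ((PySem.List.pyGet? u 0).getD 0)
          = (g.get? ((PySem.List.pyGet? u 0).getD 0)).map fAB := get?_rel fAB a g hrel _
      rcases hg : g.get? ((PySem.List.pyGet? u 0).getD 0) with _ | l
      · have ha : a.get? ((PySem.List.pyGet? u 0).getD 0) = none := by rw [hget, hg]; rfl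
        have hcg : g.contains ((PySem.List.pyGet? u 0).getD 0) = false := by
          rw [PySem.Dict.contains_eq_isSome_get?, hg]; rfl
        have hca : a.contains ((PySem.List.pyGet? u 0).getD 0) = false := by
          rw [PySem.Dict.contains_eq_isSome_get?, ha]; rfl
        have hgd : g.getD ((PySem.List.pyGet? u 0).getD 0) [] = [] :=
          PySem.Dict.getD_of_get?_eq_none _ _ hg
        simp only [ha, hgd]
        apply ih
        · exact PySem.Dict.nodup_keys_insert _ _ _ hnd
        · rw [PySem.Dict.items_insert_of_not_contains _ _ hca,
            PySem.Dict.items_insert_of_not_contains _ _ hcg, hrel]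
          simp [fAB_singleton]
      · have ha : a.get? ((PySem.List.pyGet? u 0).getD 0) = some (fAB l) := by
          rw [hget, hg]; rfl
        have hcg : g.contains ((PySem.List.pyGet? u 0).getD 0) = true := by
          rw [PySem.Dict.contains_eq_isSome_get?, hg]; rfl
        have hca : a.contains ((PySem.List.pyGet? u 0).getD 0) = true := by
          rw [PySem.Dict.contains_eq_isSome_get?, ha]; rfl
        have hgd : g.getD ((PySem.List.pyGet? u 0).getD 0) [] = l :=
          PySem.Dict.getD_of_get?_eq_some _ _ hg
        simp only [ha, hgd]
        rcases hidx : l.findIdx? (· != 0) with _ | i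
        · -- all stored values so far are 0: A bumps the count, B appends
          rw [if_pos (by simp [fst_fAB_of_none l hidx])]
          apply ih
          · exact PySem.Dict.nodup_keys_insert _ _ _ hnd
          · rw [PySem.Dict.items_insert_of_contains _ _ hca,
              PySem.Dict.items_insert_of_contains _ _ hcg, hrel,
              List.map_map, List.map_map]
            apply List.map_congr_left
            intro p _
            by_cases hp : p.1 = ((PySem.List.pyGet? u 0).getD 0)
            · simp [Function.comp, hp, fAB_append_zero l _ hidx, fst_fAB_of_none l hidx]
            · simp [Function.comp, hp]
        · -- a nonzero value was already seen: A leaves the record alone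
          rw [if_neg (snd_fAB_ne_zero l i hidx)]
          apply ih
          · exact PySem.Dict.nodup_keys_insert _ _ _ hnd
          · rw [PySem.Dict.items_insert_of_contains _ _ hcg, List.map_map, hrel]
            apply List.map_congr_left
            intro p hmem
            by_cases hp : p.1 = ((PySem.List.pyGet? u 0).getD 0)
            · have hv : g.get? p.1 = some p.2 :=
                PySem.Dict.get?_of_mem_items _ (by simpa using hmem) hnd
              rw [hp, hg] at hv
              have hpl : p.2 = l := by injection hv.symm
              simp [Function.comp, hp, hpl, fAB_append_nonzero l _ i hidx]
            · simp [Function.comp, hp]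

theorem fold_sum_eq (items : List (Int × List Int)) (acc : Int × Int) :
    (items.map (fun p => (p.1, fAB p.2))).foldl sumStepA acc
      = (items.map (·.2)).foldl sumStepB acc := by
  induction items generalizing acc with
  | nil => rfl
  | cons p t ih =>
      simp only [List.map_cons, List.foldl_cons, sumStepA, sumStepB]
      rw [← ih]
      congr 1
      rcases h : p.2.findIdx? (· != 0) with _ | i
      · simp [snd_fAB_eq_zero p.2 h]
      · rw [if_pos (snd_fAB_ne_zero p.2 i h)]
        simp [fAB, h]

-- ===== VERDICT (by name: the statement is the Claim_ definition above) =====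
theorem solution_spec : Claim_equal_solution := by
  intro lottery _ _
  show solution lottery = solution_alt lottery
  simp only [solution, solution_alt]
  rw [dict_invariant lottery PySem.Dict.empty PySem.Dict.empty (by simp) rfl,
    fold_sum_eq]
  rfl
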